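-- pv_equiv track=rewrite | github.com/vishrantgupta/hackerrank_solution | day_of_the_programmer.py | sumDays
-- ===== SOURCE A (Python) =====
-- def getDayOfProgrammer():
--     return 256;
--
-- def sumDays(year):
--
--     months = [("01",31), ("02",28), ("03",31), ("04",30), ("05",31), ("06",30), ("07",31), ("08",31), ("09",30), ("10",31), ("11",30), ("12",31)]
--
--     days = 0
--     nextMonth = ""
--
--     if isLeapYear(year):
--         days += 1
--
--     for key in months:
--
--         if (days + key[1] > getDayOfProgrammer()):
--             nextMonth = key[0]
--             break
--
--         days += key[1]
--
--     if year == 1918: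
--         days = days - 13
--
--     return (days, nextMonth)
--
-- def isLeapYear(year):
--
--     if year < 1918:
--         return True if year % 4 == 0 else False
--
--     if year % 400 == 0:
--         return True
--
--     if year % 4 == 0 and year % 100 != 0:
--         return True
--
--     return False
-- ===== SOURCE B (Python) =====
-- def getDayOfProgrammer():
--     return 256
--
--
-- def isLeapYear(year):
--     if year < 1918:
--         return True if year % 4 == 0 else False
--     if year % 400 == 0:
--         return True
--     if year % 4 == 0 and year % 100 != 0:
--         return True
--     return False
--
--
-- def sumDays(year):
--     # Closed form: the 256th day always falls in September, so the day count
--     # within the year is 244 in a leap year and 243 otherwise (minus the 13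
--     # calendar-shift days in 1918).
--     days = 244 if isLeapYear(year) else 243
--     if year == 1918:
--         days -= 13
--     return (days, "09")
-- ===== Notes on version B (the rewrite author's own statement) =====
-- stated objective: simpler
-- what changed: Replaced the month-table accumulation loop with a closed form: days = 244 if leap else 243 (13 subtracted for 1918) and the constant next month "09"; the same isLeapYear helper is reused.
import Mathlib
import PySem

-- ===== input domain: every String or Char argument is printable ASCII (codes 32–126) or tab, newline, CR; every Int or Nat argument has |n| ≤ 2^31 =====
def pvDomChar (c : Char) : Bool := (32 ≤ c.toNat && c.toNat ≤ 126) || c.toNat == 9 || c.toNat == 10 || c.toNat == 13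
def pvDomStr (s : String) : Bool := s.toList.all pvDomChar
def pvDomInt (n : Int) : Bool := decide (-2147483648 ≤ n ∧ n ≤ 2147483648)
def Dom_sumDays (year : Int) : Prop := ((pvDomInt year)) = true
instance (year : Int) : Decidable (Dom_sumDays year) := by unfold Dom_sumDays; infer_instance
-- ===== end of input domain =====

-- B replaces A's month-table loop with the closed form 244/243 (−13 for 1918) and constant "09"; same leap rule.
-- ===== PORT A =====
def getDayOfProgrammerA : Int := 256

def isLeapYearPy (year : Int) : Bool :=
  if year < 1918 then (if PySem.Int.mod year 4 == 0 then true else false)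
  else if PySem.Int.mod year 400 == 0 then true
  else if PySem.Int.mod year 4 == 0 && !(PySem.Int.mod year 100 == 0) then true
  else false

def sumDaysLoop : List (String × Int) → Int → String → Int × String
  | [], days, nextMonth => (days, nextMonth)
  | (m, d) :: rest, days, nextMonth =>
      if days + d > getDayOfProgrammerA then (days, m)
      else sumDaysLoop rest (days + d) nextMonth

def sumDays (year : Int) : Int × String :=
  let months : List (String × Int) :=
    [("01",31), ("02",28), ("03",31), ("04",30), ("05",31), ("06",30),
     ("07",31), ("08",31), ("09",30), ("10",31), ("11",30), ("12",31)]
  let days : Int := 0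
  let days := if isLeapYearPy year then days + 1 else days
  let r := sumDaysLoop months days ""
  let days := r.1
  let days := if year == 1918 then days - 13 else days
  (days, r.2)

-- ===== PORT B =====
def sumDays_alt (year : Int) : Int × String :=
  let days : Int := if isLeapYearPy year then 244 else 243
  let days := if year == 1918 then days - 13 else days
  (days, "09")

-- ===== PRECONDITION & SPEC =====
def Spec_sumDays (year : Int) (out : Int × String) : Prop := out = sumDays_alt year
instance (year : Int) (out : Int × String) : Decidable (Spec_sumDays year out) := by unfold Spec_sumDays; infer_instance

-- ===== CLAIM (what is proved, stated in full; the proofs are below) =====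
def Claim_equal_sumDays : Prop := ∀ (year : Int), Dom_sumDays year → Spec_sumDays year (sumDays year)

-- ===== LEMMAS AND PROOFS =====

-- ===== VERDICT (by name: the statement is the Claim_ definition above) =====
theorem sumDays_spec : Claim_equal_sumDays := by
  intro year _
  unfold Spec_sumDays sumDays sumDays_alt
  by_cases h : isLeapYearPy year = true <;>
    simp [h, sumDaysLoop, getDayOfProgrammerA]
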